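-- pv_equiv track=rewrite | github.com/oscourse-tsinghua/OS2018spring-projects-g02 | utils/litecc_new.py | general_xyi
-- ===== SOURCE A (Python) =====
-- def general_xyi(opcode, rx, ry, ii):
--     t = lambda x, n: bin(x)[2:].rjust(n, '0')
--     inv01 = lambda x: ''.join(['1' if i == '0' else '0' for i in x])
--     if (ii >= 0):
--         iii = bin(ii)[2:].rjust(16, '0')
--     else:
--         iii = inv01(bin(-ii-1)[2:].rjust(16, '0'))
--     binrep = t(opcode, 6) + t(rx, 5) + t(ry, 5) + iii
--     return hex(int(binrep,2))[2:].rjust(8, '0')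
-- ===== SOURCE B (Python) =====
-- def general_xyi(opcode, rx, ry, ii):
--     imm = ii % 0x10000
--     val = (opcode << 26) + (rx << 21) + (ry << 16) + imm
--     return format(val, '08x')
-- ===== Notes on version B (the rewrite author's own statement) =====
-- stated objective: idiomatic
-- what changed: Packs the fields arithmetically (shift the opcode/registers into place, reduce the immediate mod 2^16 for two's complement) and formats the 32-bit value with format(val,'08x'), instead of building a padded binary string per field, concatenating, reparsing with int(.,2) and re-rendering via hex().
-- outside the precondition, e.g. on general_xyi(0, 0, 0, 65536): A returns '00010000', B returns '00000000'; on general_xyi(1, 32, 0, 0): A returns '0c000000', B returns '08000000'; on general_xyi(-1, 0, 0, 0): A raises ValueError, B returns '-4000000'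
import Mathlib
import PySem

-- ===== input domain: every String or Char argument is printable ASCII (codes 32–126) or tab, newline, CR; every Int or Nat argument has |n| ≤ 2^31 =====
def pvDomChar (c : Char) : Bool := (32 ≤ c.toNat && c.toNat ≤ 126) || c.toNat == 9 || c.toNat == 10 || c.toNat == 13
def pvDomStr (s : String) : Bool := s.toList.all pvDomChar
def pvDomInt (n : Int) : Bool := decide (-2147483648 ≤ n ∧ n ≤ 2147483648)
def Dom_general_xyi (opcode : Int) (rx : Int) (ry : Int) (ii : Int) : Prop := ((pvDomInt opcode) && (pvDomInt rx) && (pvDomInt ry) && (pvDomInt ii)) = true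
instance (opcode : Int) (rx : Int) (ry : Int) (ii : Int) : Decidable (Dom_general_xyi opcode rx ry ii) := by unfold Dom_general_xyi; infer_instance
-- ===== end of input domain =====

-- B packs the fields arithmetically (shifts + immediate mod 2^16) into one 32-bit value
-- and hex-formats it, instead of A's build/concatenate/reparse of padded binary strings (idiomatic).

-- ===== PORT A =====

-- bin(n)[2:] digit list for n ≥ 1 (MSB first); matches CPython's bin on positives
def pvBinAux : Nat → List Char → List Char
  | 0, acc => acc
  | (n+1), acc => pvBinAux ((n+1) / 2) ((if (n+1) % 2 = 1 then '1' else '0') :: acc)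

-- bin(x)[2:] for x ≥ 0 (Pre_general_xyi keeps every bin argument nonnegative; negatives would make int(binrep,2) raise)
def pvBin (x : Int) : List Char := if x ≤ 0 then ['0'] else pvBinAux x.toNat []

-- s.rjust(n, '0')
def pvRjust (n : Nat) (s : List Char) : List Char := List.replicate (n - s.length) '0' ++ s

-- t = lambda x, n: bin(x)[2:].rjust(n, '0')
def pvT (x : Int) (n : Nat) : List Char := pvRjust n (pvBin x)

-- inv01 = lambda x: ''.join(['1' if i == '0' else '0' for i in x])
def pvInv01 (s : List Char) : List Char := s.map (fun c => if c = '0' then '1' else '0')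

-- int(s, 2) on a string of 0/1 digits (Pre_ keeps every digit binary)
def pvParseBin (s : List Char) : Nat := s.foldl (fun a c => 2 * a + (if c = '1' then 1 else 0)) 0

def pvHexDigit (d : Nat) : Char :=
  if d < 10 then Char.ofNat (48 + d) else Char.ofNat (87 + d)

-- hex(n)[2:] digit list for n ≥ 1 (MSB first)
def pvHexAux : Nat → List Char → List Char
  | 0, acc => acc
  | (n+1), acc => pvHexAux ((n+1) / 16) (pvHexDigit ((n+1) % 16) :: acc)

-- hex(n)[2:] for n ≥ 0
def pvHex (n : Nat) : List Char := if n = 0 then ['0'] else pvHexAux n []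

def general_xyi (opcode : Int) (rx : Int) (ry : Int) (ii : Int) : String :=
  let iii : List Char :=
    if ii ≥ 0 then pvRjust 16 (pvBin ii)
    else pvInv01 (pvRjust 16 (pvBin (-ii - 1)))
  let binrep := pvT opcode 6 ++ pvT rx 5 ++ pvT ry 5 ++ iii
  String.ofList (pvRjust 8 (pvHex (pvParseBin binrep)))

-- ===== PORT B =====

-- format(val, '08x'): pad to 8 with '0'; a negative value is rendered as '-' followed by the
-- magnitude padded to width 7 (CPython counts the sign into the field width)
def pvFmt08x (val : Int) : String :=
  if val < 0 then String.ofList ('-' :: pvRjust 7 (pvHex (-val).toNat))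
  else String.ofList (pvRjust 8 (pvHex val.toNat))

def general_xyi_alt (opcode : Int) (rx : Int) (ry : Int) (ii : Int) : String :=
  let imm := PySem.Int.mod ii 65536
  let val := opcode * 67108864 + rx * 2097152 + ry * 65536 + imm  -- the three shifts are exact multiplications
  pvFmt08x val

-- ===== PRECONDITION & SPEC =====
-- Pre_ restricts to the encoder's natural domain — each field within its bit width (6-bit opcode,
-- 5-bit registers, 16-bit two's-complement immediate); outside it A either raises (negative
-- opcode/rx/ry) or concatenates over-wide binary strings whose value is an accident of the layout.
def Pre_general_xyi (opcode : Int) (rx : Int) (ry : Int) (ii : Int) : Prop :=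
  0 ≤ opcode ∧ opcode < 64 ∧ 0 ≤ rx ∧ rx < 32 ∧ 0 ≤ ry ∧ ry < 32 ∧ -32768 ≤ ii ∧ ii < 65536
instance (opcode : Int) (rx : Int) (ry : Int) (ii : Int) : Decidable (Pre_general_xyi opcode rx ry ii) := by unfold Pre_general_xyi; infer_instance

def pvWitness_general_xyi : Int × Int × Int × Int := (35, 3, 17, -5)

def Spec_general_xyi (opcode : Int) (rx : Int) (ry : Int) (ii : Int) (out : String) : Prop := out = general_xyi_alt opcode rx ry ii
instance (opcode : Int) (rx : Int) (ry : Int) (ii : Int) (out : String) : Decidable (Spec_general_xyi opcode rx ry ii out) := by unfold Spec_general_xyi; infer_instance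

-- ===== CLAIM (what is proved, stated in full; the proofs are below) =====
def Claim_equal_general_xyi : Prop := ∀ (opcode : Int) (rx : Int) (ry : Int) (ii : Int), Dom_general_xyi opcode rx ry ii → Pre_general_xyi opcode rx ry ii → Spec_general_xyi opcode rx ry ii (general_xyi opcode rx ry ii)

-- ===== LEMMAS AND PROOFS =====

theorem pvParseBin_from (a : Nat) (s : List Char) :
    s.foldl (fun a c => 2 * a + (if c = '1' then 1 else 0)) a = a * 2 ^ s.length + pvParseBin s := by
  induction s generalizing a with
  | nil => simp [pvParseBin]
  | cons c t ih =>
    simp only [List.foldl_cons, pvParseBin, List.length_cons]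
    rw [ih, ih (2 * 0 + _)]
    ring

theorem pvParseBin_cons (c : Char) (s : List Char) :
    pvParseBin (c :: s) = (if c = '1' then 1 else 0) * 2 ^ s.length + pvParseBin s := by
  simp only [pvParseBin, List.foldl_cons]
  rw [pvParseBin_from]
  norm_num
  rfl

theorem pvParseBin_append (a b : List Char) :
    pvParseBin (a ++ b) = pvParseBin a * 2 ^ b.length + pvParseBin b := by
  simp only [pvParseBin, List.foldl_append]
  rw [pvParseBin_from]
  rfl

theorem pvParseBin_replicate_zero (k : Nat) (s : List Char) :
    pvParseBin (List.replicate k '0' ++ s) = pvParseBin s := by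
  induction k with
  | zero => simp
  | succ n ih =>
    rw [List.replicate_succ, List.cons_append, pvParseBin_cons, pvParseBin_append] at *
    simp_all

theorem pvParseBin_rjust (n : Nat) (s : List Char) : pvParseBin (pvRjust n s) = pvParseBin s :=
  pvParseBin_replicate_zero _ _

theorem pvBinAux_append (n : Nat) : ∀ (acc : List Char), pvBinAux n acc = pvBinAux n [] ++ acc := by
  induction n using Nat.strong_induction_on with
  | _ n ih =>
    intro acc
    match n with
    | 0 => simp [pvBinAux]
    | m+1 =>
      rw [pvBinAux, pvBinAux]
      rw [ih ((m+1)/2) (by omega) ((if (m+1) % 2 = 1 then '1' else '0') :: acc),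
          ih ((m+1)/2) (by omega) [(if (m+1) % 2 = 1 then '1' else '0')]]
      simp

theorem pvParseBin_pvBinAux (n : Nat) : pvParseBin (pvBinAux n []) = n := by
  induction n using Nat.strong_induction_on with
  | _ n ih =>
    match n with
    | 0 => simp [pvBinAux, pvParseBin]
    | m+1 =>
      rw [pvBinAux, pvBinAux_append ((m+1)/2), pvParseBin_append, ih ((m+1)/2) (by omega)]
      have h2 : (m+1) % 2 = 1 ∨ (m+1) % 2 = 0 := by omega
      rcases h2 with h | h <;> simp [h, pvParseBin] <;> omega

theorem pvBinAux_length_le (k : Nat) : ∀ n, n < 2 ^ k → (pvBinAux n []).length ≤ k := by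
  induction k with
  | zero => intro n hn; interval_cases n; simp [pvBinAux]
  | succ k ih =>
    intro n hn
    match n with
    | 0 => simp [pvBinAux]
    | m+1 =>
      rw [pvBinAux, pvBinAux_append ((m+1)/2)]
      have := ih ((m+1)/2) (by rw [pow_succ] at hn; omega)
      simp
      omega

theorem pvParseBin_pvBin (x : Int) (hx : 0 ≤ x) : (pvParseBin (pvBin x) : Int) = x := by
  unfold pvBin
  split
  · have : x = 0 := le_antisymm (by assumption) hx
    simp [this, pvParseBin]
  · rw [pvParseBin_pvBinAux]; omega

theorem pvBin_length_le (x : Int) (k : Nat) (hk : 1 ≤ k) (hx : x < 2 ^ k) :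
    (pvBin x).length ≤ k := by
  unfold pvBin
  split
  · simpa using hk
  · have h2 : ((2 ^ k : Nat) : Int) = 2 ^ k := by push_cast; ring
    exact pvBinAux_length_le k x.toNat (by omega)

theorem pvRjust_length (n : Nat) (s : List Char) (h : s.length ≤ n) : (pvRjust n s).length = n := by
  simp [pvRjust]; omega

theorem pvT_length (x : Int) (n : Nat) (hn : 1 ≤ n) (hx : x < 2 ^ n) : (pvT x n).length = n :=
  pvRjust_length n _ (pvBin_length_le x n hn hx)

theorem pvParseBin_pvT (x : Int) (n : Nat) (hx : 0 ≤ x) : (pvParseBin (pvT x n) : Int) = x := by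
  rw [pvT, pvParseBin_rjust, pvParseBin_pvBin x hx]

def pvBinaryStr (s : List Char) : Prop := ∀ c ∈ s, c = '0' ∨ c = '1'

theorem pvBinaryStr_pvBinAux (n : Nat) (acc : List Char) (h : pvBinaryStr acc) :
    pvBinaryStr (pvBinAux n acc) := by
  induction n using Nat.strong_induction_on generalizing acc with
  | _ n ih =>
    match n with
    | 0 => simpa [pvBinAux]
    | m+1 =>
      rw [pvBinAux]
      refine ih ((m+1)/2) (by omega) _ ?_
      intro c hc
      rcases List.mem_cons.mp hc with hc | hc
      · rw [hc]; split <;> simp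
      · exact h c hc

theorem pvBinaryStr_rjust_pvBin (n : Nat) (x : Int) : pvBinaryStr (pvRjust n (pvBin x)) := by
  intro c hc
  rcases List.mem_append.mp hc with hc | hc
  · left; exact List.eq_of_mem_replicate hc
  · unfold pvBin at hc
    split at hc
    · simp at hc; left; exact hc
    · exact pvBinaryStr_pvBinAux _ [] (by intro c h; simp at h) c hc

theorem pvParseBin_inv01 (s : List Char) (h : pvBinaryStr s) :
    pvParseBin (pvInv01 s) + pvParseBin s + 1 = 2 ^ s.length := by
  induction s with
  | nil => simp [pvParseBin, pvInv01]
  | cons c t ih =>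
    have ht := ih (fun x hx => h x (List.mem_cons_of_mem c hx))
    have hc := h c List.mem_cons_self
    simp only [pvInv01, List.map_cons] at *
    rw [pvParseBin_cons, pvParseBin_cons, List.length_map, List.length_cons, pow_succ]
    rcases hc with hc | hc <;> simp [hc] <;> omega

-- the packed value both programs hex-format
theorem pvParseBin_binrep (opcode rx ry ii : Int) (hp : Pre_general_xyi opcode rx ry ii) :
    (pvParseBin (pvT opcode 6 ++ pvT rx 5 ++ pvT ry 5 ++
        (if ii ≥ 0 then pvRjust 16 (pvBin ii) else pvInv01 (pvRjust 16 (pvBin (-ii - 1))))) : Int)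
      = opcode * 67108864 + rx * 2097152 + ry * 65536 + PySem.Int.mod ii 65536 := by
  obtain ⟨h1, h2, h3, h4, h5, h6, h7, h8⟩ := hp
  have hmod : PySem.Int.mod ii 65536 = if ii ≥ 0 then ii else ii + 65536 := by
    rw [PySem.Int.mod_eq_emod_of_pos (show (0:Int) < 65536 by norm_num)]
    split <;> omega
  set iii := (if ii ≥ 0 then pvRjust 16 (pvBin ii) else pvInv01 (pvRjust 16 (pvBin (-ii - 1)))) with hiii
  have hlen : iii.length = 16 := by
    rw [hiii]; split
    · exact pvRjust_length 16 _ (pvBin_length_le ii 16 (by norm_num) (by norm_num; omega))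
    · rw [pvInv01, List.length_map]
      exact pvRjust_length 16 _ (pvBin_length_le (-ii - 1) 16 (by norm_num) (by norm_num; omega))
  have hval : (pvParseBin iii : Int) = PySem.Int.mod ii 65536 := by
    rw [hiii, hmod]; split
    · rw [pvParseBin_rjust, pvParseBin_pvBin ii (by omega)]
    · have hb := pvBinaryStr_rjust_pvBin 16 (-ii - 1)
      have hinv := pvParseBin_inv01 _ hb
      have hl : (pvRjust 16 (pvBin (-ii - 1))).length = 16 :=
        pvRjust_length 16 _ (pvBin_length_le (-ii - 1) 16 (by norm_num) (by norm_num; omega))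
      rw [hl] at hinv
      have hv : (pvParseBin (pvRjust 16 (pvBin (-ii - 1))) : Int) = -ii - 1 := by
        rw [pvParseBin_rjust, pvParseBin_pvBin (-ii - 1) (by omega)]
      norm_num at hinv ⊢
      omega
  rw [pvParseBin_append, pvParseBin_append, pvParseBin_append]
  rw [hlen, pvT_length ry 5 (by norm_num) (by norm_num; omega),
      pvT_length rx 5 (by norm_num) (by norm_num; omega)]
  push_cast
  rw [pvParseBin_pvT opcode 6 h1, pvParseBin_pvT rx 5 h3, pvParseBin_pvT ry 5 h5, hval]
  ring

-- ===== VERDICT (by name: the statement is the Claim_ definition above) =====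
theorem general_xyi_spec : Claim_equal_general_xyi := by
  intro opcode rx ry ii _ hp
  have h := pvParseBin_binrep opcode rx ry ii hp
  have hmodnn : 0 ≤ PySem.Int.mod ii 65536 := by
    rw [PySem.Int.mod_eq_emod_of_pos (show (0:Int) < 65536 by norm_num)]
    exact Int.emod_nonneg _ (by norm_num)
  obtain ⟨h1, _, h3, _, h5, _⟩ := hp
  have hkey : pvParseBin (pvT opcode 6 ++ pvT rx 5 ++ pvT ry 5 ++
      (if ii ≥ 0 then pvRjust 16 (pvBin ii) else pvInv01 (pvRjust 16 (pvBin (-ii - 1)))))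
      = (opcode * 67108864 + rx * 2097152 + ry * 65536 + PySem.Int.mod ii 65536).toNat := by
    omega
  have hvalnn : ¬ (opcode * 67108864 + rx * 2097152 + ry * 65536 + PySem.Int.mod ii 65536 < 0) := by
    omega
  simp only [Spec_general_xyi, general_xyi, general_xyi_alt, pvFmt08x, if_neg hvalnn]
  rw [hkey]
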